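-- pv_equiv track=rewrite | github.com/kaihaan/spending | backend/mcp/gmail_vendor_parsers.py | decode_quoted_printable_amount
-- ===== SOURCE A (Python) =====
-- def decode_quoted_printable_amount(text: str) -> str:
--     """
--     Decode quoted-printable encoded currency amounts.
--
--     Apple emails use quoted-printable encoding where:
--     - =C2=A3 is the £ symbol (UTF-8 encoded)
--     - =E2=80=A2 is the bullet point (•)
--
--     Args:
--         text: Potentially encoded text
--
--     Returns:
--         Decoded text with proper currency symbols
--     """
--     if not text:
--         return text
--
--     # Common quoted-printable patterns in Apple emails
--     replacements = [
--         ("=C2=A3", "£"),  # GBP symbol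
--         ("=C2=A0", " "),  # Non-breaking space
--         ("=E2=80=A2", "•"),  # Bullet point
--         ("=\n", ""),  # Line continuation
--     ]
--
--     result = text
--     for encoded, decoded in replacements:
--         result = result.replace(encoded, decoded)
--
--     return result
-- ===== SOURCE B (Python) =====
-- import re
--
-- _MAP = {"=C2=A3": "\u00a3", "=C2=A0": " ", "=E2=80=A2": "\u2022", "=\n": ""}
-- _PAT = re.compile("|".join(re.escape(k) for k in _MAP))
--
--
-- def decode_quoted_printable_amount(text: str) -> str:
--     if not text:
--         return text
--     return _PAT.sub(lambda m: _MAP[m.group(0)], text)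
-- ===== Notes on version B (the rewrite author's own statement) =====
-- stated objective: idiomatic
-- what changed: Replaces four sequential full-string .replace passes with one precompiled regex alternation that decodes all four quoted-printable sequences in a single left-to-right scan.
import Mathlib
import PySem

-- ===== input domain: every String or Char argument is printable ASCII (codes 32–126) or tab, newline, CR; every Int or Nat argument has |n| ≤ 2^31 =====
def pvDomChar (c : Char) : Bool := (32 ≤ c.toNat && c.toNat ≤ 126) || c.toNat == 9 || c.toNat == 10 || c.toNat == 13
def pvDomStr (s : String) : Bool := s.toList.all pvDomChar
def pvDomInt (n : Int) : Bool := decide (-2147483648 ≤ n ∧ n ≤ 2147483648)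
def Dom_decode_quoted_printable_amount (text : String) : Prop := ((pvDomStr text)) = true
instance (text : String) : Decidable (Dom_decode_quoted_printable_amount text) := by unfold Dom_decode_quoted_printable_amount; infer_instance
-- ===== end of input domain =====

-- B replaces A's four sequential full-string .replace passes by a single left-to-right
-- scan (one regex alternation over the four literal patterns) — idiomatic, one pass.

-- ===== PORT A =====
-- A: guard, then fold the replacement list through str.replace, one full pass each.
def decode_quoted_printable_amount (text : String) : String :=
  if text = "" then text
  else
    [("=C2=A3", "£"), ("=C2=A0", " "), ("=E2=80=A2", "•"), ("=\n", "")].foldl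
      (fun result p => PySem.Str.replace result p.1 p.2) text

-- ===== PORT B =====
-- B's single scan: at each position try the four literal alternatives in order
-- (regex alternation, leftmost match, first alternative wins), else copy the char.
def pvScanB : List Char → List Char
  | [] => []
  | c :: t =>
    if h1 : ['=', 'C', '2', '=', 'A', '3'].isPrefixOf (c :: t) then
      '£' :: pvScanB ((c :: t).drop 6)
    else if h2 : ['=', 'C', '2', '=', 'A', '0'].isPrefixOf (c :: t) then
      ' ' :: pvScanB ((c :: t).drop 6)
    else if h3 : ['=', 'E', '2', '=', '8', '0', '=', 'A', '2'].isPrefixOf (c :: t) then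
      '•' :: pvScanB ((c :: t).drop 9)
    else if h4 : ['=', '\n'].isPrefixOf (c :: t) then
      pvScanB ((c :: t).drop 2)
    else
      c :: pvScanB t
  termination_by l => l.length
  decreasing_by
  · have := (List.isPrefixOf_iff_prefix.mp h1).length_le
    simp only [List.length_cons, List.length_drop] at this ⊢
    omega
  · have := (List.isPrefixOf_iff_prefix.mp h2).length_le
    simp only [List.length_cons, List.length_drop] at this ⊢
    omega
  · have := (List.isPrefixOf_iff_prefix.mp h3).length_le
    simp only [List.length_cons, List.length_drop] at this ⊢
    omega
  · have := (List.isPrefixOf_iff_prefix.mp h4).length_le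
    simp only [List.length_cons, List.length_drop] at this ⊢
    omega
  · simp

def decode_quoted_printable_amount_alt (text : String) : String :=
  if text = "" then text
  else String.ofList (pvScanB text.toList)

-- ===== PRECONDITION & SPEC =====
def Spec_decode_quoted_printable_amount (text : String) (out : String) : Prop := out = decode_quoted_printable_amount_alt text
instance (text : String) (out : String) : Decidable (Spec_decode_quoted_printable_amount text out) := by unfold Spec_decode_quoted_printable_amount; infer_instance

-- ===== CLAIM (what is proved, stated in full; the proofs are below) =====
def Claim_equal_decode_quoted_printable_amount : Prop := ∀ (text : String), Dom_decode_quoted_printable_amount text → Spec_decode_quoted_printable_amount text (decode_quoted_printable_amount text)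

-- ===== LEMMAS AND PROOFS =====

-- fuel irrelevance for PySem.Chars.replace.go (old nonempty)
lemma pvGoIrrel (old new : List Char) (hold : old ≠ []) :
    ∀ fuel l acc, l.length ≤ fuel →
      PySem.Chars.replace.go old new fuel l acc
        = acc.reverse ++ PySem.Chars.replace.go old new l.length l [] := by
  intro fuel
  induction fuel using Nat.strong_induction_on with
  | _ fuel ih =>
    match fuel with
    | 0 =>
      intro l acc hl
      have : l = [] := List.length_eq_zero_iff.mp (Nat.le_zero.mp hl)
      subst this
      simp [PySem.Chars.replace.go]
    | fuel + 1 =>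
      intro l acc hl
      match l with
      | [] => simp [PySem.Chars.replace.go]
      | c :: t =>
        have hk : 1 ≤ old.length := by
          cases old with
          | nil => exact absurd rfl hold
          | cons a b => simp
        have htf : t.length ≤ fuel := by simp at hl; omega
        simp only [List.length_cons, PySem.Chars.replace.go]
        by_cases hp : old.isPrefixOf (c :: t)
        · simp only [hp, if_pos]
          have hdt : (List.drop old.length (c :: t)).length ≤ t.length := by
            simp only [List.length_drop, List.length_cons]; omega
          rw [ih fuel (Nat.lt_succ_self _) _ _ (le_trans hdt htf),
            ih t.length (Nat.lt_succ_of_le htf) _ _ hdt]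
          simp
        · simp only [hp, Bool.false_eq_true, if_neg, not_false_eq_true]
          rw [ih fuel (Nat.lt_succ_self _) _ _ htf,
            ih t.length (Nat.lt_succ_of_le htf) t [c] (le_refl _)]
          simp
lemma pvReplaceNil (old new : List Char) (hold : old ≠ []) :
    PySem.Chars.replace [] old new = [] := by
  simp [PySem.Chars.replace, PySem.Chars.replace.go, List.isEmpty_eq_false_iff.mpr hold]

-- non-match step
lemma pvReplaceNeg (old new : List Char) (hold : old ≠ []) (c : Char) (t : List Char)
    (hp : ¬ old.isPrefixOf (c :: t)) :
    PySem.Chars.replace (c :: t) old new = c :: PySem.Chars.replace t old new := by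
  simp only [PySem.Chars.replace, List.isEmpty_eq_false_iff.mpr hold, Bool.false_eq_true,
    if_neg, not_false_eq_true]
  rw [show (c :: t).length = t.length + 1 from rfl]
  simp only [PySem.Chars.replace.go, hp, Bool.false_eq_true, if_neg, not_false_eq_true]
  rw [pvGoIrrel old new hold t.length t [c] (le_refl _)]
  simp

-- match step
lemma pvReplacePos (old new : List Char) (hold : old ≠ []) (c : Char) (t : List Char)
    (hp : old.isPrefixOf (c :: t)) :
    PySem.Chars.replace (c :: t) old new
      = new ++ PySem.Chars.replace ((c :: t).drop old.length) old new := by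
  simp only [PySem.Chars.replace, List.isEmpty_eq_false_iff.mpr hold, Bool.false_eq_true,
    if_neg, not_false_eq_true]
  rw [show (c :: t).length = t.length + 1 from rfl]
  simp only [PySem.Chars.replace.go, hp, if_pos]
  have hk : 1 ≤ old.length := by
    cases old with
    | nil => exact absurd rfl hold
    | cons a b => simp
  have hdl : ((c :: t).drop old.length).length ≤ t.length := by
    simp only [List.length_drop, List.length_cons]; omega
  rw [pvGoIrrel old new hold t.length _ _ hdl]
  simp

-- if s (nonempty, disjoint from the replacement) is a prefix of the output of a
-- replace with nonempty pattern and nonempty replacement, it was a prefix of the input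
lemma pvPrefixReflect (old new : List Char) (hold : old ≠ []) (hnew : new ≠ []) :
    ∀ t s, s ≠ [] → (∀ c ∈ s, c ∉ new) →
      s.isPrefixOf (PySem.Chars.replace t old new) = true → s.isPrefixOf t = true := by
  intro t
  induction t with
  | nil =>
    intro s hs _ hpre
    rw [pvReplaceNil old new hold] at hpre
    cases s with
    | nil => exact absurd rfl hs
    | cons a b => simp [List.isPrefixOf] at hpre
  | cons c t ih =>
    intro s hs hdisj hpre
    by_cases hp : old.isPrefixOf (c :: t)
    · rw [pvReplacePos old new hold c t hp] at hpre
      cases s with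
      | nil => exact absurd rfl hs
      | cons s0 s' =>
        exfalso
        cases new with
        | nil => exact absurd rfl hnew
        | cons n0 n' =>
          simp only [List.cons_append, List.isPrefixOf, Bool.and_eq_true, beq_iff_eq] at hpre
          exact hdisj s0 List.mem_cons_self (hpre.1 ▸ List.mem_cons_self)
    · rw [pvReplaceNeg old new hold c t hp] at hpre
      cases s with
      | nil => exact absurd rfl hs
      | cons s0 s' =>
        simp only [List.isPrefixOf, Bool.and_eq_true, beq_iff_eq] at hpre ⊢
        refine ⟨hpre.1, ?_⟩
        cases hs' : s' with
        | nil => simp [List.isPrefixOf]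
        | cons a b =>
          subst hs'
          exact ih (a :: b) (by simp)
            (fun x hx => hdisj x (List.mem_cons_of_mem _ hx)) hpre.2

-- abbreviations for the four stages (proof-local)
def pvR1 (x : List Char) : List Char := PySem.Chars.replace x ['=', 'C', '2', '=', 'A', '3'] ['£']
def pvR2 (x : List Char) : List Char := PySem.Chars.replace x ['=', 'C', '2', '=', 'A', '0'] [' ']
def pvR3 (x : List Char) : List Char := PySem.Chars.replace x ['=', 'E', '2', '=', '8', '0', '=', 'A', '2'] ['•']
def pvR4 (x : List Char) : List Char := PySem.Chars.replace x ['=', '\n'] []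

-- the heart of the claim: four sequential passes = one combined scan
set_option maxRecDepth 8192 in
lemma pvMain : ∀ (n : ℕ) (l : List Char), l.length ≤ n →
    pvR4 (pvR3 (pvR2 (pvR1 l))) = pvScanB l := by
  intro n
  induction n with
  | zero =>
    intro l hl
    have : l = [] := List.length_eq_zero_iff.mp (Nat.le_zero.mp hl)
    subst this
    simp [pvR1, pvR2, pvR3, pvR4, pvReplaceNil, pvScanB]
  | succ n ih =>
    intro l hl
    cases l with
    | nil => simp [pvR1, pvR2, pvR3, pvR4, pvReplaceNil, pvScanB]
    | cons c t =>
      by_cases h1 : List.isPrefixOf ['=', 'C', '2', '=', 'A', '3'] (c :: t)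
      ·
        obtain ⟨rest, hrest⟩ := List.isPrefixOf_iff_prefix.mp h1
        have hr : rest.length ≤ n := by
          have h := congrArg List.length hrest
          simp at h hl; omega
        have a1 : pvR1 ('='::'C'::'2'::'='::'A'::'3'::rest) = '£' :: pvR1 (rest) := by
          unfold pvR1
          rw [pvReplacePos _ _ (by simp) '=' ('C'::'2'::'='::'A'::'3'::rest) (by simp [List.isPrefixOf])]
          simp [List.drop]
        have a2 : pvR2 ('£' :: pvR1 rest) = '£' :: pvR2 (pvR1 rest) := by
          unfold pvR2
          exact pvReplaceNeg _ _ (by simp) '£' (pvR1 rest) (by simp [List.isPrefixOf])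
        have a3 : pvR3 ('£' :: pvR2 (pvR1 rest)) = '£' :: pvR3 (pvR2 (pvR1 rest)) := by
          unfold pvR3
          exact pvReplaceNeg _ _ (by simp) '£' (pvR2 (pvR1 rest)) (by simp [List.isPrefixOf])
        have a4 : pvR4 ('£' :: pvR3 (pvR2 (pvR1 rest))) = '£' :: pvR4 (pvR3 (pvR2 (pvR1 rest))) := by
          unfold pvR4
          exact pvReplaceNeg _ _ (by simp) '£' (pvR3 (pvR2 (pvR1 rest))) (by simp [List.isPrefixOf])
        rw [← hrest]
        simp only [List.cons_append, List.nil_append]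
        rw [a1, a2, a3, a4, pvScanB]
        rw [dif_pos (by simp [List.isPrefixOf])]
        simp only [List.drop_succ_cons, List.drop_zero]
        rw [ih rest hr]
      · by_cases h2 : List.isPrefixOf ['=', 'C', '2', '=', 'A', '0'] (c :: t)
        ·
          obtain ⟨rest, hrest⟩ := List.isPrefixOf_iff_prefix.mp h2
          have hr : rest.length ≤ n := by
            have h := congrArg List.length hrest
            simp at h hl; omega
          have a1 : pvR1 ('='::'C'::'2'::'='::'A'::'0'::rest) = '='::'C'::'2'::'='::'A'::'0'::pvR1 (rest) := by
            unfold pvR1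
            rw [pvReplaceNeg _ _ (by simp) '=' ('C'::'2'::'='::'A'::'0'::rest) (by simp [List.isPrefixOf]),
              pvReplaceNeg _ _ (by simp) 'C' ('2'::'='::'A'::'0'::rest) (by simp [List.isPrefixOf]),
              pvReplaceNeg _ _ (by simp) '2' ('='::'A'::'0'::rest) (by simp [List.isPrefixOf]),
              pvReplaceNeg _ _ (by simp) '=' ('A'::'0'::rest) (by simp [List.isPrefixOf]),
              pvReplaceNeg _ _ (by simp) 'A' ('0'::rest) (by simp [List.isPrefixOf]),
              pvReplaceNeg _ _ (by simp) '0' (rest) (by simp [List.isPrefixOf])]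
          have a2 : pvR2 ('='::'C'::'2'::'='::'A'::'0'::pvR1 rest) = ' ' :: pvR2 (pvR1 rest) := by
            unfold pvR2
            rw [pvReplacePos _ _ (by simp) '=' ('C'::'2'::'='::'A'::'0'::pvR1 rest) (by simp [List.isPrefixOf])]
            simp [List.drop]
          have a3 : pvR3 (' ' :: pvR2 (pvR1 rest)) = ' ' :: pvR3 (pvR2 (pvR1 rest)) := by
            unfold pvR3
            exact pvReplaceNeg _ _ (by simp) ' ' (pvR2 (pvR1 rest)) (by simp [List.isPrefixOf])
          have a4 : pvR4 (' ' :: pvR3 (pvR2 (pvR1 rest))) = ' ' :: pvR4 (pvR3 (pvR2 (pvR1 rest))) := by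
            unfold pvR4
            exact pvReplaceNeg _ _ (by simp) ' ' (pvR3 (pvR2 (pvR1 rest))) (by simp [List.isPrefixOf])
          rw [← hrest]
          simp only [List.cons_append, List.nil_append]
          rw [a1, a2, a3, a4, pvScanB]
          rw [dif_neg (by simp [List.isPrefixOf]), dif_pos (by simp [List.isPrefixOf])]
          simp only [List.drop_succ_cons, List.drop_zero]
          rw [ih rest hr]
        · by_cases h3 : List.isPrefixOf ['=', 'E', '2', '=', '8', '0', '=', 'A', '2'] (c :: t)
          ·
            obtain ⟨rest, hrest⟩ := List.isPrefixOf_iff_prefix.mp h3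
            have hr : rest.length ≤ n := by
              have h := congrArg List.length hrest
              simp at h hl; omega
            have a1 : pvR1 ('='::'E'::'2'::'='::'8'::'0'::'='::'A'::'2'::rest) = '='::'E'::'2'::'='::'8'::'0'::'='::'A'::'2'::pvR1 (rest) := by
              unfold pvR1
              rw [pvReplaceNeg _ _ (by simp) '=' ('E'::'2'::'='::'8'::'0'::'='::'A'::'2'::rest) (by simp [List.isPrefixOf]),
                pvReplaceNeg _ _ (by simp) 'E' ('2'::'='::'8'::'0'::'='::'A'::'2'::rest) (by simp [List.isPrefixOf]),
                pvReplaceNeg _ _ (by simp) '2' ('='::'8'::'0'::'='::'A'::'2'::rest) (by simp [List.isPrefixOf]),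
                pvReplaceNeg _ _ (by simp) '=' ('8'::'0'::'='::'A'::'2'::rest) (by simp [List.isPrefixOf]),
                pvReplaceNeg _ _ (by simp) '8' ('0'::'='::'A'::'2'::rest) (by simp [List.isPrefixOf]),
                pvReplaceNeg _ _ (by simp) '0' ('='::'A'::'2'::rest) (by simp [List.isPrefixOf]),
                pvReplaceNeg _ _ (by simp) '=' ('A'::'2'::rest) (by simp [List.isPrefixOf]),
                pvReplaceNeg _ _ (by simp) 'A' ('2'::rest) (by simp [List.isPrefixOf]),
                pvReplaceNeg _ _ (by simp) '2' (rest) (by simp [List.isPrefixOf])]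
            have a2 : pvR2 ('='::'E'::'2'::'='::'8'::'0'::'='::'A'::'2'::pvR1 rest) = '='::'E'::'2'::'='::'8'::'0'::'='::'A'::'2'::pvR2 (pvR1 rest) := by
              unfold pvR2
              rw [pvReplaceNeg _ _ (by simp) '=' ('E'::'2'::'='::'8'::'0'::'='::'A'::'2'::pvR1 rest) (by simp [List.isPrefixOf]),
                pvReplaceNeg _ _ (by simp) 'E' ('2'::'='::'8'::'0'::'='::'A'::'2'::pvR1 rest) (by simp [List.isPrefixOf]),
                pvReplaceNeg _ _ (by simp) '2' ('='::'8'::'0'::'='::'A'::'2'::pvR1 rest) (by simp [List.isPrefixOf]),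
                pvReplaceNeg _ _ (by simp) '=' ('8'::'0'::'='::'A'::'2'::pvR1 rest) (by simp [List.isPrefixOf]),
                pvReplaceNeg _ _ (by simp) '8' ('0'::'='::'A'::'2'::pvR1 rest) (by simp [List.isPrefixOf]),
                pvReplaceNeg _ _ (by simp) '0' ('='::'A'::'2'::pvR1 rest) (by simp [List.isPrefixOf]),
                pvReplaceNeg _ _ (by simp) '=' ('A'::'2'::pvR1 rest) (by simp [List.isPrefixOf]),
                pvReplaceNeg _ _ (by simp) 'A' ('2'::pvR1 rest) (by simp [List.isPrefixOf]),
                pvReplaceNeg _ _ (by simp) '2' (pvR1 rest) (by simp [List.isPrefixOf])]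
            have a3 : pvR3 ('='::'E'::'2'::'='::'8'::'0'::'='::'A'::'2'::pvR2 (pvR1 rest)) = '•' :: pvR3 (pvR2 (pvR1 rest)) := by
              unfold pvR3
              rw [pvReplacePos _ _ (by simp) '=' ('E'::'2'::'='::'8'::'0'::'='::'A'::'2'::pvR2 (pvR1 rest)) (by simp [List.isPrefixOf])]
              simp [List.drop]
            have a4 : pvR4 ('•' :: pvR3 (pvR2 (pvR1 rest))) = '•' :: pvR4 (pvR3 (pvR2 (pvR1 rest))) := by
              unfold pvR4
              exact pvReplaceNeg _ _ (by simp) '•' (pvR3 (pvR2 (pvR1 rest))) (by simp [List.isPrefixOf])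
            rw [← hrest]
            simp only [List.cons_append, List.nil_append]
            rw [a1, a2, a3, a4, pvScanB]
            rw [dif_neg (by simp [List.isPrefixOf]), dif_neg (by simp [List.isPrefixOf]), dif_pos (by simp [List.isPrefixOf])]
            simp only [List.drop_succ_cons, List.drop_zero]
            rw [ih rest hr]
          · by_cases h4 : List.isPrefixOf ['=', '\n'] (c :: t)
            ·
              obtain ⟨rest, hrest⟩ := List.isPrefixOf_iff_prefix.mp h4
              have hr : rest.length ≤ n := by
                have h := congrArg List.length hrest
                simp at h hl; omega
              have a1 : pvR1 ('='::'\n'::rest) = '='::'\n'::pvR1 (rest) := by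
                unfold pvR1
                rw [pvReplaceNeg _ _ (by simp) '=' ('\n'::rest) (by simp [List.isPrefixOf]),
                  pvReplaceNeg _ _ (by simp) '\n' (rest) (by simp [List.isPrefixOf])]
              have a2 : pvR2 ('='::'\n'::pvR1 rest) = '='::'\n'::pvR2 (pvR1 rest) := by
                unfold pvR2
                rw [pvReplaceNeg _ _ (by simp) '=' ('\n'::pvR1 rest) (by simp [List.isPrefixOf]),
                  pvReplaceNeg _ _ (by simp) '\n' (pvR1 rest) (by simp [List.isPrefixOf])]
              have a3 : pvR3 ('='::'\n'::pvR2 (pvR1 rest)) = '='::'\n'::pvR3 (pvR2 (pvR1 rest)) := by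
                unfold pvR3
                rw [pvReplaceNeg _ _ (by simp) '=' ('\n'::pvR2 (pvR1 rest)) (by simp [List.isPrefixOf]),
                  pvReplaceNeg _ _ (by simp) '\n' (pvR2 (pvR1 rest)) (by simp [List.isPrefixOf])]
              have a4 : pvR4 ('='::'\n'::pvR3 (pvR2 (pvR1 rest))) = pvR4 (pvR3 (pvR2 (pvR1 rest))) := by
                unfold pvR4
                rw [pvReplacePos _ _ (by simp) '=' ('\n'::pvR3 (pvR2 (pvR1 rest))) (by simp [List.isPrefixOf])]
                simp [List.drop]
              rw [← hrest]
              simp only [List.cons_append, List.nil_append]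
              rw [a1, a2, a3, a4, pvScanB]
              rw [dif_neg (by simp [List.isPrefixOf]), dif_neg (by simp [List.isPrefixOf]), dif_neg (by simp [List.isPrefixOf]), dif_pos (by simp [List.isPrefixOf])]
              simp only [List.drop_succ_cons, List.drop_zero]
              rw [ih rest hr]
            ·
              -- no pattern matches at the head: every stage copies c
              have ht : t.length ≤ n := by simp at hl; omega
              have a1 : pvR1 (c :: t) = c :: pvR1 t := by
                unfold pvR1
                exact pvReplaceNeg _ _ (by simp) c t h1
              have a2 : pvR2 (c :: pvR1 t) = c :: pvR2 (pvR1 t) := by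
                unfold pvR1 pvR2
                refine pvReplaceNeg _ _ (by simp) c _ ?_
                intro hpre
                simp only [List.isPrefixOf, Bool.and_eq_true, beq_iff_eq] at hpre
                have hs := pvPrefixReflect ['=', 'C', '2', '=', 'A', '3'] ['£'] (by simp) (by simp) t
                  ['C', '2', '=', 'A', '0'] (by simp) (by simp) hpre.2
                apply h2
                simp only [List.isPrefixOf, Bool.and_eq_true, beq_iff_eq]
                exact ⟨hpre.1, hs⟩
              have a3 : pvR3 (c :: pvR2 (pvR1 t)) = c :: pvR3 (pvR2 (pvR1 t)) := by
                unfold pvR1 pvR2 pvR3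
                refine pvReplaceNeg _ _ (by simp) c _ ?_
                intro hpre
                simp only [List.isPrefixOf, Bool.and_eq_true, beq_iff_eq] at hpre
                have hs := pvPrefixReflect ['=', 'C', '2', '=', 'A', '0'] [' '] (by simp) (by simp) _
                  ['E', '2', '=', '8', '0', '=', 'A', '2'] (by simp) (by simp) hpre.2
                have hs' := pvPrefixReflect ['=', 'C', '2', '=', 'A', '3'] ['£'] (by simp) (by simp) t
                  ['E', '2', '=', '8', '0', '=', 'A', '2'] (by simp) (by simp) hs
                apply h3
                simp only [List.isPrefixOf, Bool.and_eq_true, beq_iff_eq]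
                exact ⟨hpre.1, hs'⟩
              have a4 : pvR4 (c :: pvR3 (pvR2 (pvR1 t))) = c :: pvR4 (pvR3 (pvR2 (pvR1 t))) := by
                unfold pvR1 pvR2 pvR3 pvR4
                refine pvReplaceNeg _ _ (by simp) c _ ?_
                intro hpre
                simp only [List.isPrefixOf, Bool.and_eq_true, beq_iff_eq] at hpre
                have hs := pvPrefixReflect ['=', 'E', '2', '=', '8', '0', '=', 'A', '2'] ['•'] (by simp) (by simp) _
                  ['\n'] (by simp) (by simp) hpre.2
                have hs' := pvPrefixReflect ['=', 'C', '2', '=', 'A', '0'] [' '] (by simp) (by simp) _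
                  ['\n'] (by simp) (by simp) hs
                have hs'' := pvPrefixReflect ['=', 'C', '2', '=', 'A', '3'] ['£'] (by simp) (by simp) t
                  ['\n'] (by simp) (by simp) hs'
                apply h4
                simp only [List.isPrefixOf, Bool.and_eq_true, beq_iff_eq]
                exact ⟨hpre.1, hs''⟩
              rw [a1, a2, a3, a4, pvScanB]
              rw [dif_neg h1, dif_neg h2, dif_neg h3, dif_neg h4]
              rw [ih t ht]

-- ===== VERDICT (by name: the statement is the Claim_ definition above) =====
theorem decode_quoted_printable_amount_spec : Claim_equal_decode_quoted_printable_amount := by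
  intro text _
  unfold Spec_decode_quoted_printable_amount decode_quoted_printable_amount decode_quoted_printable_amount_alt
  by_cases h : text = ""
  · simp [h]
  · simp only [h, if_neg, not_false_eq_true, List.foldl]
    have := pvMain text.toList.length text.toList (le_refl _)
    simp only [pvR1, pvR2, pvR3, pvR4] at this
    simp [PySem.Str.replace, this]
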